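-- pv_equiv track=rewrite | github.com/azmaveth/docvault | docvault/core/content_chunker.py | _create_semantic_chunks
-- ===== SOURCE A (Python) =====
-- def _create_semantic_chunks(
--     content: str, boundaries: list[int], chunk_size: int
-- ) -> list[tuple[int, int]]:
--     """Create chunks based on semantic boundaries."""
--     chunks = []
--     current_start = 0
--
--     for i in range(1, len(boundaries)):
--         boundary = boundaries[i]
--
--         # If we've exceeded chunk size, create a chunk
--         if boundary - current_start >= chunk_size:
--             # Find the best boundary to break at
--             best_boundary = current_start
--             for j in range(i - 1, 0, -1):
--                 if boundaries[j] - current_start <= chunk_size: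
--                     best_boundary = boundaries[j]
--                     break
--
--             if best_boundary > current_start:
--                 chunks.append((current_start, best_boundary))
--                 current_start = best_boundary
--             else:
--                 # No good boundary found, force break at chunk_size
--                 chunks.append((current_start, current_start + chunk_size))
--                 current_start = current_start + chunk_size
--
--     # Add final chunk
--     if current_start < len(content):
--         chunks.append((current_start, len(content)))
--
--     return chunks
-- ===== SOURCE B (Python) =====
-- def _bisect_upto(values, limit):
--     """Hand-written bisect_right: number of leading elements <= limit (values sorted ascending)."""
--     lo, hi = 0, len(values)
--     while lo < hi:
--         mid = (lo + hi) // 2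
--         if values[mid] <= limit:
--             lo = mid + 1
--         else:
--             hi = mid
--     return lo
--
--
-- def _create_semantic_chunks(content, boundaries, chunk_size):
--     """Create chunks based on semantic boundaries.
--
--     Single left-to-right pass keeping a monotonic stack of the right-to-left
--     strict minima of boundaries[1:i] (strictly increasing values); the best
--     break boundary is found by binary search in that stack instead of by
--     rescanning the boundary list backwards.
--     """
--     chunks = []
--     current_start = 0
--     stack = []  # strictly increasing; candidates for "rightmost boundary <= limit"
--     for i in range(1, len(boundaries)):
--         v = boundaries[i]
--         if v - current_start >= chunk_size:
--             limit = current_start + chunk_size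
--             c = _bisect_upto(stack, limit)
--             best = stack[c - 1] if c else current_start
--             if best > current_start:
--                 chunks.append((current_start, best))
--                 current_start = best
--             else:
--                 chunks.append((current_start, current_start + chunk_size))
--                 current_start = current_start + chunk_size
--         while stack and stack[-1] >= v:
--             stack.pop()
--         stack.append(v)
--     if current_start < len(content):
--         chunks.append((current_start, len(content)))
--     return chunks
-- ===== Notes on version B (the rewrite author's own statement) =====
-- stated objective: alternative
-- what changed: A rescans the boundary list backwards inside the loop to find the break boundary; B instead maintains a monotonic stack of the right-to-left strict minima of the boundaries seen so far and picks the break boundary by a hand-written binary search on that stack.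
import Mathlib
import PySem

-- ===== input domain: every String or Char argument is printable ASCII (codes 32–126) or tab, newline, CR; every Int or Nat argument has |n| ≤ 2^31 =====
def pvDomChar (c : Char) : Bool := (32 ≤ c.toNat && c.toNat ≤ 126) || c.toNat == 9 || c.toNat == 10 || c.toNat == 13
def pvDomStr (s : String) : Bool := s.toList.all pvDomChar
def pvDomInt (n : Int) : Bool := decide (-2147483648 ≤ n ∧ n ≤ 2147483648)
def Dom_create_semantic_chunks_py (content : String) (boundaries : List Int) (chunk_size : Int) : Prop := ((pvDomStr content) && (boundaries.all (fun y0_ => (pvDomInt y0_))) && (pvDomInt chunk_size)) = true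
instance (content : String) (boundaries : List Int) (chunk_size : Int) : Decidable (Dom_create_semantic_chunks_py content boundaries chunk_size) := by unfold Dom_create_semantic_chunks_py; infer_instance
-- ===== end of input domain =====

-- B replaces A's backward rescan of the boundary list by a monotonic stack of candidate
-- boundaries queried with a hand-written binary search (alternative algorithm, same measured cost).

-- ===== PORT A =====
-- inner loop: for j in range(i-1, 0, -1): if boundaries[j] - current_start <= chunk_size: best = boundaries[j]; break
def aBest (bs : List Int) (cs k : Int) : Nat → Int
  | 0 => cs
  | Nat.succ j => if bs.getD (j+1) 0 - cs ≤ k then bs.getD (j+1) 0 else aBest bs cs k j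

-- one iteration of A's outer loop (state = (chunks, current_start))
def aStep (bs : List Int) (k : Int) (st : List (Int × Int) × Int) (i : Nat) : List (Int × Int) × Int :=
  if k ≤ bs.getD i 0 - st.2 then
    let best := aBest bs st.2 k (i - 1)
    if st.2 < best then (st.1 ++ [(st.2, best)], best)
    else (st.1 ++ [(st.2, st.2 + k)], st.2 + k)
  else st

def create_semantic_chunks_py (content : String) (boundaries : List Int) (chunk_size : Int) : List (Int × Int) :=
  let st := (List.range' 1 (boundaries.length - 1)).foldl (aStep boundaries chunk_size) ([], 0)
  if st.2 < PySem.Str.len content then st.1 ++ [(st.2, PySem.Str.len content)] else st.1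

-- ===== PORT B =====
-- while stack and stack[-1] >= v: stack.pop()
def popGE (s : List Int) (v : Int) : List Int :=
  if h : s ≠ [] then
    if v ≤ s.getLast h then popGE s.dropLast v else s
  else []
termination_by s.length
decreasing_by
  have := List.length_pos_of_ne_nil h
  simp [List.length_dropLast]; omega

-- _bisect_upto's while loop: lo, hi = 0, len(values); while lo < hi: ...
def bup (s : List Int) (limit : Int) (lo hi : Nat) : Nat :=
  if lo < hi then
    if s.getD ((lo + hi) / 2) 0 ≤ limit then bup s limit ((lo + hi) / 2 + 1) hi
    else bup s limit lo ((lo + hi) / 2)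
  else lo
termination_by hi - lo
decreasing_by all_goals omega

-- one iteration of B's loop (state = ((chunks, current_start), stack))
def bStep (bs : List Int) (k : Int) (st : (List (Int × Int) × Int) × List Int) (i : Nat) :
    (List (Int × Int) × Int) × List Int :=
  let v := bs.getD i 0
  let chunks := st.1.1
  let cs := st.1.2
  let stack := st.2
  let st' :=
    if k ≤ v - cs then
      let c := bup stack (cs + k) 0 stack.length
      let best := if c = 0 then cs else stack.getD (c - 1) 0
      if cs < best then (chunks ++ [(cs, best)], best)
      else (chunks ++ [(cs, cs + k)], cs + k)
    else (chunks, cs)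
  (st', popGE stack v ++ [v])

def create_semantic_chunks_py_alt (content : String) (boundaries : List Int) (chunk_size : Int) : List (Int × Int) :=
  let st := (List.range' 1 (boundaries.length - 1)).foldl (bStep boundaries chunk_size) (([], 0), [])
  if st.1.2 < PySem.Str.len content then st.1.1 ++ [(st.1.2, PySem.Str.len content)] else st.1.1

-- ===== PRECONDITION & SPEC =====
def Spec_create_semantic_chunks_py (content : String) (boundaries : List Int) (chunk_size : Int) (out : List (Int × Int)) : Prop := out = create_semantic_chunks_py_alt content boundaries chunk_size
instance (content : String) (boundaries : List Int) (chunk_size : Int) (out : List (Int × Int)) : Decidable (Spec_create_semantic_chunks_py content boundaries chunk_size out) := by unfold Spec_create_semantic_chunks_py; infer_instance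

-- ===== CLAIM (what is proved, stated in full; the proofs are below) =====
def Claim_equal_create_semantic_chunks_py : Prop := ∀ (content : String) (boundaries : List Int) (chunk_size : Int), Dom_create_semantic_chunks_py content boundaries chunk_size → Spec_create_semantic_chunks_py content boundaries chunk_size (create_semantic_chunks_py content boundaries chunk_size)

-- ===== LEMMAS AND PROOFS =====

-- boundaries[1:i]  (the prefix A's backward scan ranges over)
def pref (bs : List Int) (i : Nat) : List Int := (bs.take i).drop 1

-- rightmost element of p that is ≤ limit (else d): what A's backward scan computes
def backFirst (p : List Int) (limit d : Int) : Int :=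
  (p.reverse.find? (fun x => decide (x ≤ limit))).getD d

-- what B's query computes on a stack
def qy (s : List Int) (limit cs : Int) : Int :=
  if bup s limit 0 s.length = 0 then cs else s.getD (bup s limit 0 s.length - 1) 0

-- the stack B maintains
def stk (p : List Int) : List Int := p.foldl (fun s v => popGE s v ++ [v]) []

lemma pref_succ (bs : List Int) (i : Nat) (h1 : 1 ≤ i) (h2 : i < bs.length) :
    pref bs (i + 1) = pref bs i ++ [bs.getD i 0] := by
  unfold pref
  rw [List.take_succ_eq_append_getElem h2,
    List.drop_append_of_le_length (by simp; omega), List.getD_eq_getElem bs 0 h2]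

lemma aBest_eq (bs : List Int) (cs k : Int) (j : Nat) (hj : j < bs.length) :
    aBest bs cs k j = backFirst (pref bs (j + 1)) (cs + k) cs := by
  induction j with
  | zero =>
    simp [aBest, pref, backFirst]
  | succ j ih =>
    have hstep : pref bs (j + 1 + 1) = pref bs (j + 1) ++ [bs.getD (j + 1) 0] :=
      pref_succ bs (j + 1) (by omega) hj
    rw [aBest, hstep]
    unfold backFirst
    rw [List.reverse_append, List.reverse_singleton, List.singleton_append]
    by_cases hc : bs.getD (j + 1) 0 - cs ≤ k
    · rw [if_pos hc, List.find?_cons_of_pos (by simp only [decide_eq_true_eq]; omega)]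
      rfl
    · rw [if_neg hc, List.find?_cons_of_neg (by simp only [decide_eq_true_eq]; omega)]
      exact ih (by omega)

-- popGE on a sorted stack is takeWhile (< v)
lemma takeWhile_concat_neg {α : Type} (p : α → Bool) (l : List α) (x : α) (hx : p x = false) :
    (l ++ [x]).takeWhile p = l.takeWhile p := by
  induction l with
  | nil =>
    rw [List.nil_append, List.takeWhile_cons_of_neg (by simp [hx])]
    rfl
  | cons a t ih =>
    by_cases ha : p a = true
    · rw [List.cons_append, List.takeWhile_cons_of_pos ha, List.takeWhile_cons_of_pos ha, ih]
    · rw [List.cons_append, List.takeWhile_cons_of_neg (by simp [ha]),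
        List.takeWhile_cons_of_neg (by simp [ha])]

lemma popGE_sorted (s : List Int) (v : Int) (hs : s.Pairwise (· < ·)) :
    popGE s v = s.takeWhile (fun x => decide (x < v)) := by
  induction s using popGE.induct v with
  | case3 s h =>
    rw [popGE, dif_neg h]
    have : s = [] := by simpa using h
    simp [this]
  | case1 s h hle ih =>
    rw [popGE, dif_pos h, if_pos hle,
      ih (hs.sublist (List.dropLast_sublist s))]
    conv_rhs => rw [← List.dropLast_concat_getLast h]
    rw [takeWhile_concat_neg _ _ _ (by simp; omega)]
  | case2 s h hle =>
    rw [popGE, dif_pos h, if_neg hle]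
    refine (List.takeWhile_eq_self_iff.mpr ?_).symm
    intro x hx
    have hxle : x ≤ s.getLast h := by
      conv at hx => rw [← List.dropLast_concat_getLast h]
      rcases List.mem_append.mp hx with hmem | hmem
      · have := (List.pairwise_append.mp
          (by rw [List.dropLast_concat_getLast h]; exact hs)).2.2 x hmem (s.getLast h) (by simp)
        omega
      · simp at hmem; omega
    simp; omega

-- elements strictly below the bisection point are ≤ limit
lemma bup_below (s : List Int) (limit : Int) (idx : Nat)
    (h : idx < (s.takeWhile (fun x => decide (x ≤ limit))).length) : s.getD idx 0 ≤ limit := by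
  induction s generalizing idx with
  | nil => simp at h
  | cons a t ih =>
    by_cases ha : a ≤ limit
    · rw [List.takeWhile_cons_of_pos (by simpa using ha)] at h
      cases idx with
      | zero => simpa using ha
      | succ n => exact ih n (by simpa using h)
    · rw [List.takeWhile_cons_of_neg (by simpa using ha)] at h
      simp at h

-- for a sorted stack, elements at/after the bisection point exceed limit
lemma bup_above (s : List Int) (limit : Int) (hs : s.Pairwise (· < ·)) (idx : Nat)
    (h1 : (s.takeWhile (fun x => decide (x ≤ limit))).length ≤ idx) (h2 : idx < s.length) :
    limit < s.getD idx 0 := by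
  induction s generalizing idx with
  | nil => simp at h2
  | cons a t ih =>
    rw [List.pairwise_cons] at hs
    by_cases ha : a ≤ limit
    · rw [List.takeWhile_cons_of_pos (by simpa using ha)] at h1
      cases idx with
      | zero => simp at h1
      | succ n => exact ih hs.2 n (by simpa using h1) (by simpa using h2)
    · cases idx with
      | zero => simpa using by omega
      | succ n =>
        have hn : n < t.length := by simpa using h2
        have hmem : t.getD n 0 ∈ t := by
          rw [List.getD_eq_getElem t 0 hn]; exact List.getElem_mem hn
        have := hs.1 _ hmem
        simp only [List.getD_cons_succ]
        omega

-- binary-search correctness on a sorted stack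
lemma bup_eq (s : List Int) (limit : Int) (hs : s.Pairwise (· < ·)) :
    ∀ n lo hi, hi - lo ≤ n →
      lo ≤ (s.takeWhile (fun x => decide (x ≤ limit))).length →
      (s.takeWhile (fun x => decide (x ≤ limit))).length ≤ hi → hi ≤ s.length →
      bup s limit lo hi = (s.takeWhile (fun x => decide (x ≤ limit))).length := by
  intro n
  induction n with
  | zero =>
    intro lo hi hn hlo hhi hlen
    rw [bup, if_neg (by omega)]
    omega
  | succ n ih =>
    intro lo hi hn hlo hhi hlen
    by_cases hlt : lo < hi
    · rw [bup, if_pos hlt]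
      by_cases hmid : s.getD ((lo + hi) / 2) 0 ≤ limit
      · rw [if_pos hmid]
        have hml : (lo + hi) / 2 < (s.takeWhile (fun x => decide (x ≤ limit))).length := by
          by_contra hcon
          have hab := bup_above s limit hs ((lo + hi) / 2) (by omega) (by omega)
          omega
        exact ih ((lo + hi) / 2 + 1) hi (by omega) (by omega) hhi hlen
      · rw [if_neg hmid]
        have hml : (s.takeWhile (fun x => decide (x ≤ limit))).length ≤ (lo + hi) / 2 := by
          by_contra hcon
          have hab := bup_below s limit ((lo + hi) / 2) (by omega)
          exact hmid hab
        exact ih lo ((lo + hi) / 2) (by omega) hlo (by omega) (by omega)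
    · rw [bup, if_neg hlt]
      omega

-- master invariant: the stack is sorted, and querying it = A's backward scan
lemma takeWhile_takeWhile_of_imp {α : Type} (p q : α → Bool) (l : List α)
    (h : ∀ x, p x = true → q x = true) : (l.takeWhile q).takeWhile p = l.takeWhile p := by
  induction l with
  | nil => simp
  | cons a t ih =>
    by_cases hq : q a
    · rw [List.takeWhile_cons_of_pos hq]
      by_cases hp : p a
      · rw [List.takeWhile_cons_of_pos hp, List.takeWhile_cons_of_pos hp, ih]
      · rw [List.takeWhile_cons_of_neg (by simpa using hp),
          List.takeWhile_cons_of_neg (by simpa using hp)]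
    · have hp : ¬ p a = true := fun hc => hq (h a hc)
      rw [List.takeWhile_cons_of_neg (by simpa using hq),
        List.takeWhile_cons_of_neg (by simpa using hp)]
      simp

lemma getD_prefix (l₁ l₂ : List Int) (h : l₁ <+: l₂) (idx : Nat) (hi : idx < l₁.length) :
    l₂.getD idx 0 = l₁.getD idx 0 := by
  have hj : idx < l₂.length := lt_of_lt_of_le hi h.length_le
  rw [List.getD_eq_getElem _ 0 hi, List.getD_eq_getElem _ 0 hj]
  exact (List.IsPrefix.getElem h hi).symm

lemma stk_master (p : List Int) :
    (stk p).Pairwise (· < ·) ∧ ∀ limit cs, qy (stk p) limit cs = backFirst p limit cs := by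
  induction p using List.reverseRecOn with
  | nil =>
    constructor
    · simp [stk]
    · intro limit cs
      simp [stk, qy, backFirst, bup]
  | append_singleton p v ih =>
    have hst : stk (p ++ [v]) = (stk p).takeWhile (fun x => decide (x < v)) ++ [v] := by
      rw [stk, List.foldl_append]
      show popGE (stk p) v ++ [v] = _
      rw [popGE_sorted _ _ ih.1]
    have htlt : ∀ x ∈ (stk p).takeWhile (fun x => decide (x < v)), x < v := by
      intro x hx
      simpa using List.mem_takeWhile_imp hx
    have hsorted : (stk (p ++ [v])).Pairwise (· < ·) := by
      rw [hst, List.pairwise_append]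
      exact ⟨ih.1.sublist (List.takeWhile_sublist _), by simp,
        fun x hx y hy => by simp at hy; subst hy; exact htlt x hx⟩
    refine ⟨hsorted, fun limit cs => ?_⟩
    have hbf : backFirst (p ++ [v]) limit cs =
        if v ≤ limit then v else backFirst p limit cs := by
      unfold backFirst
      rw [List.reverse_append]
      by_cases hv : v ≤ limit
      · simp [hv, List.find?_cons_of_pos]
      · rw [List.reverse_singleton, List.singleton_append,
          List.find?_cons_of_neg (p := fun x => decide (x ≤ limit)) (a := v)
            (by simp only [decide_eq_true_eq]; exact hv), if_neg hv]
    rw [hbf]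
    set t := (stk p).takeWhile (fun x => decide (x < v)) with ht
    by_cases hv : v ≤ limit
    · rw [if_pos hv]
      have hall : (stk (p ++ [v])).takeWhile (fun x => decide (x ≤ limit)) = stk (p ++ [v]) := by
        refine List.takeWhile_eq_self_iff.mpr ?_
        intro x hx
        rw [hst] at hx
        rcases List.mem_append.mp hx with hmem | hmem
        · have := htlt x hmem; simp; omega
        · simp at hmem; subst hmem; simpa using hv
      have hlen : (stk (p ++ [v])).length = t.length + 1 := by rw [hst]; simp
      have hb := bup_eq (stk (p ++ [v])) limit hsorted (stk (p ++ [v])).length 0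
        (stk (p ++ [v])).length (by omega) (by omega) (by rw [hall]) le_rfl
      rw [hall] at hb
      rw [qy, hb, if_neg (by omega), hlen]
      simp only [Nat.add_sub_cancel]
      rw [hst, List.getD_eq_getElem _ 0 (by simp)]
      exact List.getElem_concat_length rfl (by simp)
    · rw [if_neg hv]
      rw [← ih.2 limit cs]
      -- both bisection points coincide
      have hcut : (stk (p ++ [v])).takeWhile (fun x => decide (x ≤ limit)) =
          (stk p).takeWhile (fun x => decide (x ≤ limit)) := by
        rw [hst, takeWhile_concat_neg _ _ _ (by simp [hv]), ht,
          takeWhile_takeWhile_of_imp _ _ _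
            (fun x hx => by simp only [decide_eq_true_eq] at hx ⊢; omega)]
      set c0 := ((stk p).takeWhile (fun x => decide (x ≤ limit))).length with hc0
      have hc0t : c0 ≤ t.length := by
        rw [hc0, ht, ← takeWhile_takeWhile_of_imp (fun x => decide (x ≤ limit))
          (fun x => decide (x < v)) (stk p)
          (fun x hx => by simp only [decide_eq_true_eq] at hx ⊢; omega)]
        exact (List.takeWhile_sublist _).length_le
      have hb1 := bup_eq (stk (p ++ [v])) limit hsorted (stk (p ++ [v])).length 0
        (stk (p ++ [v])).length (by omega) (by omega)
        (by rw [hcut, ← hc0, hst]; simp; omega) le_rfl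
      rw [hcut, ← hc0] at hb1
      have hb2 := bup_eq (stk p) limit ih.1 (stk p).length 0 (stk p).length
        (by omega) (by omega)
        (by rw [← hc0]
            exact le_trans hc0t (by rw [ht]; exact (List.takeWhile_sublist _).length_le))
        le_rfl
      rw [← hc0] at hb2
      rw [qy, qy, hb1, hb2]
      by_cases hz : c0 = 0
      · simp [hz]
      · rw [if_neg hz, if_neg hz]
        have h1 : (stk (p ++ [v])).getD (c0 - 1) 0 = t.getD (c0 - 1) 0 := by
          rw [hst, List.getD_append _ _ _ _ (by omega)]
        have h2 : (stk p).getD (c0 - 1) 0 = t.getD (c0 - 1) 0 := by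
          exact getD_prefix t (stk p) (by rw [ht]; exact List.takeWhile_prefix _) _ (by omega)
        rw [h1, h2]

-- fold invariant tying the two loops together
lemma fold_eq (bs : List Int) (k : Int) (m : Nat) (hm : m < bs.length) :
    (List.range' 1 m).foldl (bStep bs k) (([], 0), []) =
      ((List.range' 1 m).foldl (aStep bs k) ([], 0), stk (pref bs (m + 1))) := by
  induction m with
  | zero =>
    simp [stk, pref]
  | succ m ih =>
    rw [List.range'_1_concat, List.foldl_append, List.foldl_append,
      ih (by omega)]
    have hidx : (1 : Nat) + m = m + 1 := by omega
    have hpref : pref bs (m + 1 + 1) = pref bs (m + 1) ++ [bs.getD (m + 1) 0] :=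
      pref_succ bs (m + 1) (by omega) (by omega)
    simp only [List.foldl_cons, List.foldl_nil, hidx]
    rw [bStep, aStep]
    dsimp only
    have hstack : popGE (stk (pref bs (m + 1))) (bs.getD (m + 1) 0) ++ [bs.getD (m + 1) 0] =
        stk (pref bs (m + 1 + 1)) := by
      rw [hpref]
      conv_rhs => rw [stk, List.foldl_append]
      rfl
    have hbest : (if bup (stk (pref bs (m + 1)))
          (((List.range' 1 m).foldl (aStep bs k) ([], 0)).2 + k) 0 (stk (pref bs (m + 1))).length = 0
        then ((List.range' 1 m).foldl (aStep bs k) ([], 0)).2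
        else (stk (pref bs (m + 1))).getD (bup (stk (pref bs (m + 1)))
          (((List.range' 1 m).foldl (aStep bs k) ([], 0)).2 + k) 0 (stk (pref bs (m + 1))).length - 1) 0) =
        aBest bs ((List.range' 1 m).foldl (aStep bs k) ([], 0)).2 k (m + 1 - 1) := by
      have := (stk_master (pref bs (m + 1))).2
        (((List.range' 1 m).foldl (aStep bs k) ([], 0)).2 + k)
        ((List.range' 1 m).foldl (aStep bs k) ([], 0)).2
      rw [qy] at this
      rw [this, Nat.add_sub_cancel, aBest_eq bs _ k m (by omega)]
    simp only [hstack, hbest]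

-- ===== VERDICT (by name: the statement is the Claim_ definition above) =====
theorem create_semantic_chunks_py_spec : Claim_equal_create_semantic_chunks_py := by
  intro content boundaries chunk_size _
  unfold Spec_create_semantic_chunks_py create_semantic_chunks_py create_semantic_chunks_py_alt
  rcases Nat.eq_zero_or_pos boundaries.length with hz | hpos
  · rw [hz]
    simp
  · rw [fold_eq boundaries chunk_size (boundaries.length - 1) (by omega)]
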